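-- pv_equiv track=rewrite | github.com/devyaanshdwivedi/GeeksForGeeks_ProblemOfTheDay | Check if a string is repetition of its substring of k-length.py | kSubstrConcat
-- ===== SOURCE A (Python) =====
-- def kSubstrConcat(n, s, k):
--     # Your Code Here
--     if n % k > 0:
--         return 0
--
--     mp = {}
--     for i in range(0, n // k):
--         substr = s[i * k : (i + 1) * k]
--         mp[substr] = mp.get(substr, 0) + 1
--
--     cnt = sum(val > 1 for val in mp.values())
--     return int(len(mp) <= 2 and cnt <= 1)
-- ===== SOURCE B (Python) =====
-- def kSubstrConcat(n, s, k):
--     if n % k > 0: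
--         return 0
--     chunks = sorted(s[i * k : (i + 1) * k] for i in range(n // k))
--     distinct = 0
--     repeated = 0
--     prev = None
--     runlen = 0
--     for c in chunks:
--         if c != prev:
--             distinct += 1
--             runlen = 1
--             prev = c
--         else:
--             runlen += 1
--             if runlen == 2:
--                 repeated += 1
--     return int(distinct <= 2 and repeated <= 1)
-- ===== Notes on version B (the rewrite author's own statement) =====
-- stated objective: alternative
-- what changed: Replaces A's hash-map frequency dict (plus a pass over its values) by sorting the chunk list and a single run-length scan over the sorted chunks that counts distinct runs and runs of length >= 2.
import Mathlib
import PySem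

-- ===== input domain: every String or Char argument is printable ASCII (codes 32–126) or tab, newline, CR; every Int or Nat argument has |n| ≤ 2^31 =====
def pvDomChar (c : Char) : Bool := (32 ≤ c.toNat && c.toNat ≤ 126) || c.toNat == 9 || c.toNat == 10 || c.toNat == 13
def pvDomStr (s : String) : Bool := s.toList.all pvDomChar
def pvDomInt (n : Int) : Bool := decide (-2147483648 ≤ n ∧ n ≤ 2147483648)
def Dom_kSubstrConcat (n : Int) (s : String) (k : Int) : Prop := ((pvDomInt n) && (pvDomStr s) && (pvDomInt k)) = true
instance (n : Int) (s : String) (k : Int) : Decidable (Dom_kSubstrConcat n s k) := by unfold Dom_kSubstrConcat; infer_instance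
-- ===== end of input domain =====

-- B keeps A's guard and final predicate but replaces the frequency dict by sort + one run-length scan (objective: alternative).

-- ===== PORT A =====
def kSubstrConcat (n : Int) (s : String) (k : Int) : Int :=
  if PySem.Int.mod n k > 0 then 0
  else
    let mp : PySem.Dict String Int :=
      (PySem.List.pyRange 0 (PySem.Int.floordiv n k) 1).foldl
        (fun d i =>
          let substr := PySem.Str.slice s (some (i * k)) (some ((i + 1) * k))
          d.insert substr (d.getD substr 0 + 1))
        PySem.Dict.empty
    let cnt : Int := (mp.values.map (fun v => if v > 1 then (1 : Int) else 0)).sum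
    if (mp.size : Int) ≤ 2 ∧ cnt ≤ 1 then 1 else 0

-- ===== PORT B =====
def kSubstrConcat_alt (n : Int) (s : String) (k : Int) : Int :=
  if PySem.Int.mod n k > 0 then 0
  else
    let chunks := PySem.List.sorted
      ((PySem.List.pyRange 0 (PySem.Int.floordiv n k) 1).map
        (fun i => PySem.Str.slice s (some (i * k)) (some ((i + 1) * k))))
      (fun x => x) false
    let st := chunks.foldl
      (fun (st : Option String × Int × Int × Int) c =>
        let (prev, runlen, distinct, repeated) := st
        if some c ≠ prev then (some c, 1, distinct + 1, repeated)
        else (prev, runlen + 1, distinct, if runlen + 1 = 2 then repeated + 1 else repeated))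
      (none, 0, 0, 0)
    if st.2.2.1 ≤ 2 ∧ st.2.2.2 ≤ 1 then 1 else 0

-- ===== PRECONDITION & SPEC =====
-- Pre_ excludes exactly k = 0, on which A's 'n % k' raises ZeroDivisionError (B raises there too).
def Pre_kSubstrConcat (n : Int) (s : String) (k : Int) : Prop := k ≠ 0
instance (n : Int) (s : String) (k : Int) : Decidable (Pre_kSubstrConcat n s k) := by unfold Pre_kSubstrConcat; infer_instance
def pvWitness_kSubstrConcat : Int × String × Int := (4, "abab", 2)
def Spec_kSubstrConcat (n : Int) (s : String) (k : Int) (out : Int) : Prop := out = kSubstrConcat_alt n s k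
instance (n : Int) (s : String) (k : Int) (out : Int) : Decidable (Spec_kSubstrConcat n s k out) := by unfold Spec_kSubstrConcat; infer_instance

-- ===== CLAIM (what is proved, stated in full; the proofs are below) =====
def Claim_equal_kSubstrConcat : Prop := ∀ (n : Int) (s : String) (k : Int), Dom_kSubstrConcat n s k → Pre_kSubstrConcat n s k → Spec_kSubstrConcat n s k (kSubstrConcat n s k)

-- ===== LEMMAS AND PROOFS =====

-- the run-length scan step of B's port
def pvStep (st : Option String × Int × Int × Int) (c : String) : Option String × Int × Int × Int :=
  let (prev, runlen, distinct, repeated) := st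
  if some c ≠ prev then (some c, 1, distinct + 1, repeated)
  else (prev, runlen + 1, distinct, if runlen + 1 = 2 then repeated + 1 else repeated)

-- the two quantities both programs ultimately compare against 2 and 1
def pvD (l : List String) : Int := ((PySem.Set.ofList l).length : Int)
def pvR (l : List String) : Int := ((PySem.Set.ofList l).countP (fun c => decide (1 < l.count c)) : Int)

theorem pvStep_rep (a : String) (m : Nat) (rl d rep : Int) (h : 2 ≤ rl) :
    List.foldl pvStep (some a, rl, d, rep) (List.replicate m a) = (some a, rl + m, d, rep) := by
  induction m generalizing rl with
  | zero => simp
  | succ m ih =>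
      rw [List.replicate_succ, List.foldl_cons]
      have h2 : ¬ (rl + 1 = 2) := by omega
      have hstep : pvStep (some a, rl, d, rep) a = (some a, rl + 1, d, rep) := by
        simp [pvStep, h2]
      rw [hstep, ih (rl + 1) (by omega)]
      simp only [Prod.mk.injEq, true_and, and_true]
      push_cast; ring

theorem pvStep_run (a : String) (m : Nat) (d rep : Int) :
    List.foldl pvStep (some a, 1, d, rep) (List.replicate m a)
      = (some a, 1 + (m : Int), d, rep + if m = 0 then 0 else 1) := by
  cases m with
  | zero => simp
  | succ m =>
      rw [List.replicate_succ, List.foldl_cons]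
      have hstep : pvStep (some a, (1 : Int), d, rep) a = (some a, 2, d, rep + 1) := by
        simp [pvStep]
      rw [hstep, pvStep_rep a m 2 d (rep + 1) (by omega)]
      simp only [Prod.mk.injEq, true_and, and_true]
      constructor
      · push_cast; ring
      · simp

theorem pvDropWhile_head_false {α : Type} (p : α → Bool) (t : List α) (b : α) (r' : List α)
    (h : t.dropWhile p = b :: r') : p b = false := by
  induction t with
  | nil => simp at h
  | cons x xs ih =>
      by_cases hx : p x
      · rw [List.dropWhile_cons_of_pos hx] at h; exact ih h
      · rw [List.dropWhile_cons_of_neg hx] at h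
        cases h; simpa using hx

theorem pvDR_cons (a : String) (t rest : List String) (m : Nat)
    (ht : List.replicate m a ++ rest = t) (hrest : a ∉ rest) :
    pvD (a :: t) = 1 + pvD rest ∧
    pvR (a :: t) = (if m = 0 then 0 else 1) + pvR rest := by
  have hmem : ∀ x, x ∈ PySem.Set.ofList (a :: t) ↔ x ∈ a :: PySem.Set.ofList rest := by
    intro x
    simp only [PySem.Set.mem_ofList, List.mem_cons, ← ht, List.mem_append,
      List.mem_replicate, PySem.Set.mem_ofList]
    constructor
    · rintro (h | ⟨_, h⟩ | h) <;> tauto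
    · rintro (h | h)
      · left; exact h
      · right; right; exact h
  have hnd1 : (PySem.Set.ofList (a :: t)).Nodup := PySem.Set.nodup_ofList _
  have hnd2 : (a :: PySem.Set.ofList rest).Nodup := by
    refine List.nodup_cons.mpr ⟨?_, PySem.Set.nodup_ofList _⟩
    simpa [PySem.Set.mem_ofList] using hrest
  have hperm : (PySem.Set.ofList (a :: t)).Perm (a :: PySem.Set.ofList rest) :=
    (List.perm_ext_iff_of_nodup hnd1 hnd2).mpr hmem
  have hcount_a : (a :: t).count a = 1 + m := by
    rw [← ht]
    simp [List.count_cons, List.count_append, List.count_replicate,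
      List.count_eq_zero.mpr hrest]
    omega
  have hcount_ne : ∀ c, c ≠ a → (a :: t).count c = rest.count c := by
    intro c hc
    have hac : ¬ a = c := fun h => hc h.symm
    rw [← ht]
    simp [List.count_cons, List.count_append, List.count_replicate, hac, hc]
  constructor
  · have hlen := hperm.length_eq
    simp only [pvD, hlen, List.length_cons]
    push_cast; ring
  · have hcnt := hperm.countP_eq (fun c => decide (1 < (a :: t).count c))
    have hcongr : (PySem.Set.ofList rest).countP (fun c => decide (1 < (a :: t).count c))
        = (PySem.Set.ofList rest).countP (fun c => decide (1 < rest.count c)) := by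
      apply List.countP_congr
      intro c hcmem
      have hc : c ≠ a := by
        intro h; subst h
        exact hrest ((PySem.Set.mem_ofList _ _).mp hcmem)
      rw [hcount_ne c hc]
    simp only [pvR, hcnt, List.countP_cons, hcongr, hcount_a]
    by_cases h : m = 0 <;> simp [h] <;> push_cast <;> omega

theorem pvScan_main (l : List String) (hl : l.Pairwise (· ≤ ·)) (p? : Option String)
    (hp : ∀ x ∈ l, p? ≠ some x) (rl d rep : Int) :
    (List.foldl pvStep (p?, rl, d, rep) l).2.2 = (d + pvD l, rep + pvR l) := by
  cases l with
  | nil => simp [pvD, pvR, PySem.Set.ofList]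
  | cons a t =>
      obtain ⟨ha, ht⟩ := List.pairwise_cons.mp hl
      obtain ⟨run, rest, hrun_def, hrest_def⟩ :
          ∃ run rest, run = t.takeWhile (fun x => x == a) ∧ rest = t.dropWhile (fun x => x == a) :=
        ⟨_, _, rfl, rfl⟩
      have htr : run ++ rest = t := by
        rw [hrun_def, hrest_def]; exact List.takeWhile_append_dropWhile
      have hrun : run = List.replicate run.length a := by
        apply List.eq_replicate_of_mem
        intro b hb
        rw [hrun_def] at hb
        have hpb := List.mem_takeWhile_imp hb
        exact eq_of_beq (by simpa using hpb)
      have hrest_pw : rest.Pairwise (· ≤ ·) := by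
        rw [hrest_def]; exact ht.sublist (List.dropWhile_sublist _)
      have hrest_notmem : a ∉ rest := by
        cases hres : rest with
        | nil => simp
        | cons b r' =>
            have hb_ne : (b == a) = false := by
              apply pvDropWhile_head_false (fun x => x == a) t b r'
              rw [← hrest_def]; exact hres
            have hb_mem : b ∈ t := by rw [← htr, hres]; simp
            have hab : a < b := lt_of_le_of_ne (ha b hb_mem)
              (fun h => by simp [h] at hb_ne)
            have hbr : ∀ y ∈ r', b ≤ y := by
              have hpw' : (b :: r').Pairwise (· ≤ ·) := hres ▸ hrest_pw
              exact (List.pairwise_cons.mp hpw').1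
            intro hmem
            rcases List.mem_cons.mp hmem with h | h
            · exact (ne_of_lt hab) h
            · exact (ne_of_lt (lt_of_lt_of_le hab (hbr a h))) rfl
      rw [List.foldl_cons]
      have hsa : some a ≠ p? := fun h => hp a (by simp) h.symm
      have hstep : pvStep (p?, rl, d, rep) a = (some a, 1, d + 1, rep) := by
        simp [pvStep, hsa]
      rw [hstep]
      have hsplit : t = List.replicate run.length a ++ rest := by rw [← hrun, htr]
      rw [hsplit, List.foldl_append, pvStep_run]
      have hrec := pvScan_main rest hrest_pw (some a)
        (by intro x hx h; cases Option.some_inj.mp h; exact hrest_notmem hx)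
        (1 + (run.length : Int)) (d + 1) (rep + if run.length = 0 then 0 else 1)
      rw [hrec]
      have hDR := pvDR_cons a (List.replicate run.length a ++ rest) rest run.length rfl hrest_notmem
      rw [hDR.1, hDR.2]
      simp only [Prod.mk.injEq]
      constructor <;> ring
termination_by l.length
decreasing_by
  subst l
  rw [hrest_def]
  calc (t.dropWhile (fun x => x == a)).length ≤ t.length := (List.dropWhile_sublist _).length_le
    _ < (a :: t).length := by simp

-- A's dict pass computes (pvD, pvR) of the chunk list
theorem pvA_counts (chunks : List String) :
    (((chunks.foldl (fun (d : PySem.Dict String Int) c => d.insert c (d.getD c 0 + 1)) PySem.Dict.empty).size : Int) = pvD chunks) ∧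
    ((chunks.foldl (fun (d : PySem.Dict String Int) c => d.insert c (d.getD c 0 + 1)) PySem.Dict.empty).values.map
        (fun v => if v > 1 then (1 : Int) else 0)).sum = pvR chunks := by
  have hmp : chunks.foldl (fun (d : PySem.Dict String Int) c => d.insert c (d.getD c 0 + 1)) PySem.Dict.empty
      = PySem.Dict.counter chunks := PySem.Dict.foldl_insert_getD_add_one_eq_counter chunks
  rw [hmp]
  constructor
  · have hsz : (PySem.Dict.counter chunks).size = (PySem.Set.ofList chunks).length := by
      rw [← PySem.Dict.keys_counter (xs := chunks)]
      simp [PySem.Dict.size, PySem.Dict.keys]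
    rw [hsz]; rfl
  · rw [PySem.Dict.values_eq_map_keys _ (PySem.Dict.nodup_keys_counter chunks) 0,
      PySem.Dict.keys_counter, List.map_map]
    have hfun : ((fun v => if v > 1 then (1 : Int) else 0) ∘ fun k => (PySem.Dict.counter chunks).getD k 0)
        = fun c => if (fun c => decide (1 < chunks.count c)) c then (1 : Int) else 0 := by
      funext c
      simp [PySem.Dict.getD_counter, gt_iff_lt, Nat.one_lt_cast]
    rw [hfun, PySem.List.sum_map_ite_one_zero]
    rfl

-- B's sorted chunk list has the same pvD / pvR as the chunk list
theorem pvSorted_counts (chunks : List String) :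
    pvD (PySem.List.sorted chunks (fun x => x) false) = pvD chunks ∧
    pvR (PySem.List.sorted chunks (fun x => x) false) = pvR chunks := by
  have hperm : (PySem.List.sorted chunks (fun x => x) false).Perm chunks :=
    PySem.List.sorted_perm chunks (fun x => x) false
  have hmem : ∀ x, x ∈ PySem.Set.ofList (PySem.List.sorted chunks (fun x => x) false)
      ↔ x ∈ PySem.Set.ofList chunks := by
    intro x; simp [PySem.Set.mem_ofList, hperm.mem_iff]
  have hsperm : (PySem.Set.ofList (PySem.List.sorted chunks (fun x => x) false)).Perm
      (PySem.Set.ofList chunks) :=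
    (List.perm_ext_iff_of_nodup (PySem.Set.nodup_ofList _) (PySem.Set.nodup_ofList _)).mpr hmem
  constructor
  · simp [pvD, hsperm.length_eq]
  · simp only [pvR]
    have hcongr : (PySem.Set.ofList (PySem.List.sorted chunks (fun x => x) false)).countP
          (fun c => decide (1 < (PySem.List.sorted chunks (fun x => x) false).count c))
        = (PySem.Set.ofList (PySem.List.sorted chunks (fun x => x) false)).countP
          (fun c => decide (1 < chunks.count c)) := by
      apply List.countP_congr
      intro c _
      rw [hperm.count_eq]
    rw [hcongr, hsperm.countP_eq]

-- ===== VERDICT (by name: the statement is the Claim_ definition above) =====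
theorem kSubstrConcat_spec : Claim_equal_kSubstrConcat := by
  intro n s k _ _
  unfold Spec_kSubstrConcat kSubstrConcat kSubstrConcat_alt
  by_cases hmod : PySem.Int.mod n k > 0
  · simp [hmod]
  · simp only [hmod, if_false]
    have hfold : (PySem.List.pyRange 0 (PySem.Int.floordiv n k) 1).foldl
        (fun (d : PySem.Dict String Int) i =>
          let substr := PySem.Str.slice s (some (i * k)) (some ((i + 1) * k))
          d.insert substr (d.getD substr 0 + 1)) PySem.Dict.empty
        = ((PySem.List.pyRange 0 (PySem.Int.floordiv n k) 1).map
            (fun i => PySem.Str.slice s (some (i * k)) (some ((i + 1) * k)))).foldl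
            (fun (d : PySem.Dict String Int) c => d.insert c (d.getD c 0 + 1)) PySem.Dict.empty := by
      rw [List.foldl_map]
    have hA := pvA_counts ((PySem.List.pyRange 0 (PySem.Int.floordiv n k) 1).map
      (fun i => PySem.Str.slice s (some (i * k)) (some ((i + 1) * k))))
    have hpw : (PySem.List.sorted ((PySem.List.pyRange 0 (PySem.Int.floordiv n k) 1).map
        (fun i => PySem.Str.slice s (some (i * k)) (some ((i + 1) * k)))) (fun x => x) false).Pairwise (· ≤ ·) :=
      PySem.List.sorted_pairwise _ _
    have hscan := pvScan_main _ hpw none (by intro x _ h; simp at h) 0 0 0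
    have hS := pvSorted_counts ((PySem.List.pyRange 0 (PySem.Int.floordiv n k) 1).map
      (fun i => PySem.Str.slice s (some (i * k)) (some ((i + 1) * k))))
    have hstep_eq : (fun (st : Option String × Int × Int × Int) c =>
        let (prev, runlen, distinct, repeated) := st
        if some c ≠ prev then (some c, 1, distinct + 1, repeated)
        else (prev, runlen + 1, distinct, if runlen + 1 = 2 then repeated + 1 else repeated)) = pvStep := rfl
    simp only [hfold, hstep_eq, hscan, hS.1, hS.2, hA.1, hA.2, zero_add]
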